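-- pv_equiv track=rewrite | github.com/natterstefan/umahuesla-alexa-skill | python/umahuesla/scripts/init_db.py | _parse_statements
-- ===== SOURCE A (Python) =====
-- def _parse_statements(lines):
--     """Return a generator of statements.
--
--     Args: A list of strings that can contain one or more statements.
--           Statements are separated using ';' at the end of a line
--           Everything after the last ';' will be treated as the last statement.
--     """
--     lines = (l.strip() for l in lines if l)
--     lines = (l for l in lines if not l.startswith('--'))
--     parts = []
--     for line in lines:
--         parts.append(line.rstrip(';'))
--         if line.endswith(';'):
--             yield ' '.join(parts)
--             parts[:] = []
--     if parts:
--         yield ' '.join(parts)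
-- ===== SOURCE B (Python) =====
-- def _parse_statements(lines):
--     """Return a generator of statements (scan-and-split re-implementation)."""
--     cleaned = [l.strip() for l in lines if l]
--     cleaned = [l for l in cleaned if not l.startswith('--')]
--     n = len(cleaned)
--     i = 0
--     while i < n:
--         j = i
--         while j < n and not cleaned[j].endswith(';'):
--             j += 1
--         end = j + 1 if j < n else n
--         yield ' '.join(l.rstrip(';') for l in cleaned[i:end])
--         i = end
-- ===== Notes on version B (the rewrite author's own statement) =====
-- stated objective: alternative
-- what changed: Instead of A's single pass with a mutable 'parts' accumulator flushed at each ';'-terminated line, B first materialises the cleaned lines and then repeatedly scans forward to the next ';'-terminated line, slicing out and joining one whole statement per outer step.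
import Mathlib
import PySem

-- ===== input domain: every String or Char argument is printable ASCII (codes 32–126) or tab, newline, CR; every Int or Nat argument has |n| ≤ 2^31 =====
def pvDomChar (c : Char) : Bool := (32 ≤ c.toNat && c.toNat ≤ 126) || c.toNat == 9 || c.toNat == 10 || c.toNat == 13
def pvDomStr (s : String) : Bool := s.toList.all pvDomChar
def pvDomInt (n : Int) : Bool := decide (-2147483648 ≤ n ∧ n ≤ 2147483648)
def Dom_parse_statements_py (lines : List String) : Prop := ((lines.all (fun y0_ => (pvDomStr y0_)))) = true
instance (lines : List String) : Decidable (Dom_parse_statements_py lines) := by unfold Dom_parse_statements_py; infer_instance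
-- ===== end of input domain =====

-- B replaces A's mutable-accumulator single pass by a scan-to-next-';'-terminated-line split of the cleaned lines; return value proved identical (objective: alternative).

-- shared primitive: Python's line.rstrip(';') — drop all trailing ';' characters (exact on code points)
def pvRstripSemi (s : String) : String :=
  String.ofList ((s.toList.reverse.dropWhile (fun c => c == ';')).reverse)

-- the two generator-comprehension filters both sources start with:
-- (l.strip() for l in lines if l) then (l for l in it if not l.startswith('--'))
def pvCleaned (lines : List String) : List String :=
  ((lines.filter (fun l => !(l == ""))).map PySem.Str.strip).filter
    (fun l => !PySem.Str.startswith l "--")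

-- ===== PORT A =====
-- A's for-loop over the cleaned lines with the mutable 'parts' list, then the final 'if parts:' yield
def pvGoA : List String → List String → List String
  | parts, [] => if parts.isEmpty then [] else [PySem.Str.join " " parts]
  | parts, l :: ls =>
    let parts' := parts ++ [pvRstripSemi l]
    if PySem.Str.endswith l ";" then PySem.Str.join " " parts' :: pvGoA [] ls
    else pvGoA parts' ls

def parse_statements_py (lines : List String) : List String :=
  pvGoA [] (pvCleaned lines)

-- ===== PORT B =====
-- B's outer while-loop: takeWhile/dropWhile transcribe the inner 'while j < n and not cleaned[j].endswith(';')' scan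
def pvGoB : List String → List String
  | [] => []
  | c :: cs =>
    let pre := (c :: cs).takeWhile (fun l => !PySem.Str.endswith l ";")
    match h : (c :: cs).dropWhile (fun l => !PySem.Str.endswith l ";") with
    | [] => [PySem.Str.join " " (pre.map pvRstripSemi)]
    | t :: rest => PySem.Str.join " " ((pre ++ [t]).map pvRstripSemi) :: pvGoB rest
  termination_by l => l.length
  decreasing_by
    have hle := List.length_dropWhile_le (fun l => !PySem.Str.endswith l ";") (c :: cs)
    rw [h] at hle
    simp at hle ⊢
    omega

def parse_statements_py_alt (lines : List String) : List String :=
  pvGoB (pvCleaned lines)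

-- ===== PRECONDITION & SPEC =====
def Spec_parse_statements_py (lines : List String) (out : List String) : Prop := out = parse_statements_py_alt lines
instance (lines : List String) (out : List String) : Decidable (Spec_parse_statements_py lines out) := by unfold Spec_parse_statements_py; infer_instance

-- ===== CLAIM (what is proved, stated in full; the proofs are below) =====
def Claim_equal_parse_statements_py : Prop := ∀ (lines : List String), Dom_parse_statements_py lines → Spec_parse_statements_py lines (parse_statements_py lines)

-- ===== LEMMAS AND PROOFS =====

-- the common normal form: the first statement group of `cleaned`, preceded by pending `parts`
def pvSplit (parts cleaned : List String) : List String :=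
  match cleaned.dropWhile (fun l => !PySem.Str.endswith l ";") with
  | [] =>
    if parts.isEmpty && cleaned.isEmpty then []
    else [PySem.Str.join " "
      (parts ++ (cleaned.takeWhile (fun l => !PySem.Str.endswith l ";")).map pvRstripSemi)]
  | t :: rest =>
    PySem.Str.join " "
      (parts ++ ((cleaned.takeWhile (fun l => !PySem.Str.endswith l ";")) ++ [t]).map pvRstripSemi)
      :: pvGoB rest

theorem pvGoB_eq (cleaned : List String) : pvGoB cleaned = pvSplit [] cleaned := by
  cases cleaned with
  | nil => simp [pvGoB, pvSplit]
  | cons c cs =>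
    unfold pvGoB pvSplit
    split <;> rename_i h <;> rw [h] <;> simp

theorem pvGoA_eq (cleaned : List String) : ∀ parts, pvGoA parts cleaned = pvSplit parts cleaned := by
  induction cleaned with
  | nil =>
    intro parts
    unfold pvGoA pvSplit
    simp [List.dropWhile_nil]
  | cons l ls ih =>
    intro parts
    by_cases hl : PySem.Str.endswith l ";"
    · rw [pvGoA]
      simp only [hl, if_true]
      rw [ih [], ← pvGoB_eq]
      unfold pvSplit
      rw [List.dropWhile_cons, List.takeWhile_cons]
      simp only [hl, Bool.not_true, Bool.false_eq_true, if_false, List.map_nil, List.nil_append,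
        List.map_cons]
    · rw [pvGoA]
      simp only [hl, Bool.false_eq_true, if_false]
      rw [ih (parts ++ [pvRstripSemi l])]
      unfold pvSplit
      rw [List.dropWhile_cons, List.takeWhile_cons]
      simp only [hl, Bool.not_false, if_true]
      cases h : ls.dropWhile (fun l => !PySem.Str.endswith l ";") with
      | nil => simp
      | cons t rest => simp

-- ===== VERDICT (by name: the statement is the Claim_ definition above) =====
theorem parse_statements_py_spec : Claim_equal_parse_statements_py := by
  intro lines _
  unfold Spec_parse_statements_py parse_statements_py parse_statements_py_alt
  rw [pvGoA_eq, pvGoB_eq]
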